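-- pv_equiv track=rewrite | github.com/pannaf/crossfit-leaderboard-remix | scripts/convert_data.py | extract_athlete_info
-- ===== SOURCE A (Python) =====
-- def extract_athlete_info(name_str):
--     """Extract athlete information from the name string"""
--     lines = name_str.strip().split("\n")
--     name = lines[0].strip()
--
--     info = {"name": name, "country": "", "region": "", "affiliate": "", "age": "", "height_weight": ""}
--
--     for line in lines[1:]:
--         line = line.strip()
--         if not line or line == "View Profile":
--             continue
--
--         if "Age" in line:
--             info["age"] = line
--         elif "in |" in line or "cm |" in line:
--             info["height_weight"] = line
--         elif info["country"] == "":
--             info["country"] = line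
--         elif info["region"] == "":
--             info["region"] = line
--         else:
--             info["affiliate"] = line
--
--     return info
-- ===== SOURCE B (Python) =====
-- def extract_athlete_info(name_str):
--     """Extract athlete information from the name string (collect-then-assign)."""
--     lines = [ln.strip() for ln in name_str.strip().split("\n")]
--     age = ""
--     height_weight = ""
--     others = []
--     for line in lines[1:]:
--         if not line or line == "View Profile":
--             continue
--         if "Age" in line:
--             age = line
--         elif "in |" in line or "cm |" in line:
--             height_weight = line
--         else:
--             others.append(line)
--     return {
--         "name": lines[0],
--         "country": others[0] if len(others) >= 1 else "",
--         "region": others[1] if len(others) >= 2 else "",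
--         "affiliate": others[-1] if len(others) >= 3 else "",
--         "age": age,
--         "height_weight": height_weight,
--     }
-- ===== Notes on version B (the rewrite author's own statement) =====
-- stated objective: alternative
-- what changed: Replaces A's stateful emptiness-driven dict assignment (country/region/affiliate filled by checking which slot is still empty) with a collect-then-assign decomposition: one pass buckets lines into age, height_weight and a remainder list, then country/region/affiliate are assigned positionally (first, second, and last-when-at-least-three) from that list.
import Mathlib
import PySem

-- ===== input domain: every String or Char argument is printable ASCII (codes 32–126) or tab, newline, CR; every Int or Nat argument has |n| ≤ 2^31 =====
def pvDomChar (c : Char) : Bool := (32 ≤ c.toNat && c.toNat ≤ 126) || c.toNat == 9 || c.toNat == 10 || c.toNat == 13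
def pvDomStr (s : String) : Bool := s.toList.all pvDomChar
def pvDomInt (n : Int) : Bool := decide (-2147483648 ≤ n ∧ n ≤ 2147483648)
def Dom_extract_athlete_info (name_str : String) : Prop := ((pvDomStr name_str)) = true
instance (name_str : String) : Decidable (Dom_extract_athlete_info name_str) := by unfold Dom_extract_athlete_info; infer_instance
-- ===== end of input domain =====

-- B replaces A's stateful empty-slot-driven assignment by a collect-then-positionally-assign
-- decomposition (objective: alternative); same cost, same return value.

-- ===== PORT A =====
-- A's loop state: (country, region, affiliate, age, height_weight); the dict has fixed keys
-- that are only overwritten in place, so it is this 5-tuple plus the constant name entry.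
def pvStepA (st : String × String × String × String × String) (ln : String) :
    String × String × String × String × String :=
  let line := PySem.Str.strip ln
  if line = "" ∨ line = "View Profile" then st
  else if PySem.Str.isIn "Age" line then (st.1, st.2.1, st.2.2.1, line, st.2.2.2.2)
  else if PySem.Str.isIn "in |" line ∨ PySem.Str.isIn "cm |" line then
    (st.1, st.2.1, st.2.2.1, st.2.2.2.1, line)
  else if st.1 = "" then (line, st.2.1, st.2.2.1, st.2.2.2.1, st.2.2.2.2)
  else if st.2.1 = "" then (st.1, line, st.2.2.1, st.2.2.2.1, st.2.2.2.2)
  else (st.1, st.2.1, line, st.2.2.2.1, st.2.2.2.2)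

def extract_athlete_info (name_str : String) : List (String × String) :=
  -- split? is none only for sep = ""; sep is "\n" here, so .getD [] is never taken
  let lines := (PySem.Str.split? (PySem.Str.strip name_str) "\n").getD []
  -- lines[0]: split on "\n" always returns a nonempty list, so headI is exactly Python's lines[0]
  let name := PySem.Str.strip lines.headI
  let st := (lines.drop 1).foldl pvStepA ("", "", "", "", "")
  [("name", name), ("country", st.1), ("region", st.2.1), ("affiliate", st.2.2.1),
   ("age", st.2.2.2.1), ("height_weight", st.2.2.2.2)]

-- ===== PORT B =====
-- B's loop state: (age, height_weight, others); lines are pre-stripped.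
def pvStepB (st : String × String × List String) (line : String) :
    String × String × List String :=
  if line = "" ∨ line = "View Profile" then st
  else if PySem.Str.isIn "Age" line then (line, st.2.1, st.2.2)
  else if PySem.Str.isIn "in |" line ∨ PySem.Str.isIn "cm |" line then (st.1, line, st.2.2)
  else (st.1, st.2.1, st.2.2 ++ [line])

def extract_athlete_info_alt (name_str : String) : List (String × String) :=
  let lines := ((PySem.Str.split? (PySem.Str.strip name_str) "\n").getD []).map PySem.Str.strip
  let st := (lines.drop 1).foldl pvStepB ("", "", [])
  let others := st.2.2
  [("name", lines.headI),
   ("country", if 1 ≤ others.length then (PySem.List.pyGet? others 0).getD "" else ""),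
   ("region", if 2 ≤ others.length then (PySem.List.pyGet? others 1).getD "" else ""),
   ("affiliate", if 3 ≤ others.length then (PySem.List.pyGet? others (-1)).getD "" else ""),
   ("age", st.1), ("height_weight", st.2.1)]

-- ===== PRECONDITION & SPEC =====
def Spec_extract_athlete_info (name_str : String) (out : List (String × String)) : Prop := out = extract_athlete_info_alt name_str
instance (name_str : String) (out : List (String × String)) : Decidable (Spec_extract_athlete_info name_str out) := by unfold Spec_extract_athlete_info; infer_instance

-- ===== CLAIM (what is proved, stated in full; the proofs are below) =====
def Claim_equal_extract_athlete_info : Prop := ∀ (name_str : String), Dom_extract_athlete_info name_str → Spec_extract_athlete_info name_str (extract_athlete_info name_str)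

-- ===== LEMMAS AND PROOFS =====

-- project B's 'others' list onto A's three positional slots
def pvCountry (o : List String) : String :=
  if 1 ≤ o.length then (PySem.List.pyGet? o 0).getD "" else ""
def pvRegion (o : List String) : String :=
  if 2 ≤ o.length then (PySem.List.pyGet? o 1).getD "" else ""
def pvAffil (o : List String) : String :=
  if 3 ≤ o.length then (PySem.List.pyGet? o (-1)).getD "" else ""

def pvProj (st : String × String × List String) : String × String × String × String × String :=
  (pvCountry st.2.2, pvRegion st.2.2, pvAffil st.2.2, st.1, st.2.1)

theorem pvCountry_nil : pvCountry [] = "" := by simp [pvCountry]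
theorem pvCountry_cons (x : String) (l : List String) : pvCountry (x :: l) = x := by
  simp [pvCountry]
theorem pvRegion_nil : pvRegion [] = "" := by simp [pvRegion]
theorem pvRegion_one (x : String) : pvRegion [x] = "" := by simp [pvRegion]
theorem pvRegion_two (x y : String) (l : List String) : pvRegion (x :: y :: l) = y := by
  have h : PySem.List.pyGet? (x :: y :: l) 1 = some y := by
    rw [show (1 : Int) = ((1 : Nat) : Int) from rfl, PySem.List.pyGet?_natCast]
    simp
  simp [pvRegion]
theorem pvAffil_nil : pvAffil [] = "" := by simp [pvAffil]
theorem pvAffil_one (x : String) : pvAffil [x] = "" := by simp [pvAffil]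
theorem pvAffil_two (x y : String) : pvAffil [x, y] = "" := by simp [pvAffil]
theorem pvAffil_app3 (x y z : String) (l : List String) :
    pvAffil (x :: y :: (l ++ [z])) = z := by
  rw [pvAffil, if_pos (by simp), PySem.List.pyGet?_neg_one, ← List.cons_append,
    ← List.cons_append, List.getLast?_concat]
  rfl

theorem pvLoop_eq (l : List String) (age hw : String) (o : List String)
    (ho : ∀ x ∈ o, x ≠ "") :
    l.foldl pvStepA (pvProj (age, hw, o)) =
      pvProj ((l.map PySem.Str.strip).foldl pvStepB (age, hw, o)) := by
  induction l generalizing age hw o with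
  | nil => rfl
  | cons hd tl ih =>
    simp only [List.map_cons, List.foldl_cons]
    set line := PySem.Str.strip hd with hline
    by_cases hskip : line = "" ∨ line = "View Profile"
    · rw [show pvStepA (pvProj (age, hw, o)) hd = pvProj (age, hw, o) by
        simp only [pvStepA, ← hline]; rw [if_pos hskip],
        show pvStepB (age, hw, o) line = (age, hw, o) by
        simp only [pvStepB]; rw [if_pos hskip]]
      exact ih age hw o ho
    · by_cases hage : PySem.Str.isIn "Age" line = true
      · rw [show pvStepA (pvProj (age, hw, o)) hd = pvProj (line, hw, o) by
          simp only [pvStepA, pvProj, ← hline]; rw [if_neg hskip, if_pos hage],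
          show pvStepB (age, hw, o) line = (line, hw, o) by
          simp only [pvStepB]; rw [if_neg hskip, if_pos hage]]
        exact ih line hw o ho
      · by_cases hhw : PySem.Str.isIn "in |" line = true ∨ PySem.Str.isIn "cm |" line = true
        · rw [show pvStepA (pvProj (age, hw, o)) hd = pvProj (age, line, o) by
            simp only [pvStepA, pvProj, ← hline]
            rw [if_neg hskip, if_neg hage, if_pos hhw],
            show pvStepB (age, hw, o) line = (age, line, o) by
            simp only [pvStepB]; rw [if_neg hskip, if_neg hage, if_pos hhw]]
          exact ih age line o ho
        · have hne : line ≠ "" := fun h => hskip (Or.inl h)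
          have hstB : pvStepB (age, hw, o) line = (age, hw, o ++ [line]) := by
            simp only [pvStepB]; rw [if_neg hskip, if_neg hage, if_neg hhw]
          have hstA : pvStepA (pvProj (age, hw, o)) hd = pvProj (age, hw, o ++ [line]) := by
            simp only [pvStepA, pvProj, ← hline]
            rw [if_neg hskip, if_neg hage, if_neg hhw]
            rcases o with _ | ⟨x, _ | ⟨y, rest⟩⟩
            ·
              simp [pvCountry_nil, pvRegion_nil, pvAffil_nil,
                pvCountry_cons, pvRegion_one, pvAffil_one]
            · have hx : x ≠ "" := ho x (by simp)
              rw [pvCountry_cons, if_neg hx, pvRegion_one, if_pos rfl]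
              simp only [List.cons_append, List.nil_append, pvCountry_cons, pvRegion_two,
                pvAffil_one, pvAffil_two]
            · have hx : x ≠ "" := ho x (by simp)
              have hy : y ≠ "" := ho y (by simp)
              rw [pvCountry_cons, if_neg hx, pvRegion_two, if_neg hy]
              simp only [List.cons_append, pvCountry_cons, pvRegion_two, pvAffil_app3]
          rw [hstA, hstB]
          exact ih age hw (o ++ [line]) (by
            intro x hx
            rcases List.mem_append.mp hx with h | h
            · exact ho x h
            · simp only [List.mem_singleton] at h; subst h; exact hne)

theorem extract_athlete_info_spec : Claim_equal_extract_athlete_info := by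
  intro name_str _
  unfold Spec_extract_athlete_info extract_athlete_info extract_athlete_info_alt
  set L := (PySem.Str.split? (PySem.Str.strip name_str) "\n").getD [] with hL
  have hdrop : (L.map PySem.Str.strip).drop 1 = (L.drop 1).map PySem.Str.strip :=
    (List.map_drop ..).symm
  have hhead : (L.map PySem.Str.strip).headI = PySem.Str.strip L.headI := by
    cases L with
    | nil => simp only [List.map_nil, List.headI]; exact (by decide : PySem.Str.strip "" = "").symm
    | cons a l => simp [List.headI]
  have h := pvLoop_eq (L.drop 1) "" "" [] (by intro x hx; simp at hx)
  have h0 : pvProj ("", "", ([] : List String)) = ("", "", "", "", "") := by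
    simp [pvProj, pvCountry_nil, pvRegion_nil, pvAffil_nil]
  rw [h0] at h
  simp only [hdrop, hhead, h, pvProj, pvCountry, pvRegion, pvAffil]
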